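-- pv_equiv track=rewrite | github.com/jankurzawski/maaspyret | run_maaspyret.py | alternating_blocks
-- ===== SOURCE A (Python) =====
-- def alternating_blocks(a, b, length, n_switches):
--     n_blocks = n_switches + 1
--     block_size = length // n_blocks
--
--     values = [a, b] * ((n_blocks + 1) // 2)
--     values = values[:n_blocks]
--
--     lst = []
--     for v in values:
--         lst.extend([v] * block_size)
--
--     # pad remainder if length not divisible
--     remainder = length - len(lst)
--     if remainder > 0:
--         lst.extend([values[-1]] * remainder)
--
--     return lst
-- ===== SOURCE B (Python) =====
-- def alternating_blocks(a, b, length, n_switches):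
--     n_blocks = n_switches + 1
--     block_size = length // n_blocks  # same ZeroDivisionError as A when n_blocks == 0
--     out = []
--     for i in range(length):
--         if block_size > 0:
--             blk = min(i // block_size, n_blocks - 1)
--             out.append(a if blk % 2 == 0 else b)
--         else:
--             # length < n_blocks: every position gets the last block's value
--             out.append(a if n_blocks % 2 == 1 else b)
--     return out
-- ===== Notes on version B (the rewrite author's own statement) =====
-- stated objective: alternative
-- what changed: B walks output positions once and derives each value from index arithmetic (clamped i//block_size parity) instead of extending the list block-by-block and padding the remainder afterwards.
import Mathlib
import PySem

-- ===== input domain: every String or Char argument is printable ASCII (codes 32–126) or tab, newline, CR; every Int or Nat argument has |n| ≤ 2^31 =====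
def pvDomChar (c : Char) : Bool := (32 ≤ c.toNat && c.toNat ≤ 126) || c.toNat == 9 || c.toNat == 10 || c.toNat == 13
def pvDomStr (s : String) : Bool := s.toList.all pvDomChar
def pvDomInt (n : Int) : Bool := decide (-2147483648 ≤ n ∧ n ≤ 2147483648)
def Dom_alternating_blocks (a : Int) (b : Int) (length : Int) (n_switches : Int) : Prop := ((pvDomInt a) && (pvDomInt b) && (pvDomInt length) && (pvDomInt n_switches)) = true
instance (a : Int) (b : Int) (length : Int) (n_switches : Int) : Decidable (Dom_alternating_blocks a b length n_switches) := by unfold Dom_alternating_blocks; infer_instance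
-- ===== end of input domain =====

-- B derives each output position's value from index arithmetic in one pass instead of
-- extending the list block-by-block with a remainder pad (objective: alternative).

-- ===== PORT A =====
def alternating_blocks (a : Int) (b : Int) (length : Int) (n_switches : Int) : List Int :=
  let n_blocks := n_switches + 1
  let block_size := PySem.Int.floordiv length n_blocks
  -- [a, b] * k : Python list repetition, empty for k ≤ 0 (hand port, exact)
  let values := (List.replicate (PySem.Int.floordiv (n_blocks + 1) 2).toNat [a, b]).flatten
  let values := PySem.List.slice values none (some n_blocks)
  let lst := values.foldl (fun lst v => lst ++ List.replicate block_size.toNat v) []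
  let remainder := length - (lst.length : Int)
  if remainder > 0 then
    match PySem.List.pyGet? values (-1) with
    | some last => lst ++ List.replicate remainder.toNat last
    | none => []   -- Python raises IndexError here (outside Pre_)
  else lst

-- ===== PORT B =====
def alternating_blocks_alt (a : Int) (b : Int) (length : Int) (n_switches : Int) : List Int :=
  let n_blocks := n_switches + 1
  let block_size := PySem.Int.floordiv length n_blocks
  (PySem.List.pyRange 0 length 1).foldl (fun out i =>
    out ++ [if block_size > 0 then
              (if PySem.Int.mod (min (PySem.Int.floordiv i block_size) (n_blocks - 1)) 2 = 0 then a else b)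
            else
              (if PySem.Int.mod n_blocks 2 = 1 then a else b)]) []

-- ===== PRECONDITION & SPEC =====
-- Pre_ excludes exactly the inputs where A raises: n_switches = -1 (ZeroDivisionError),
-- and n_switches ≤ -2 with length > 0 (IndexError: values[-1] on an empty list).
def Pre_alternating_blocks (a : Int) (b : Int) (length : Int) (n_switches : Int) : Prop :=
  0 ≤ n_switches ∨ (n_switches ≤ -2 ∧ length ≤ 0)
instance (a : Int) (b : Int) (length : Int) (n_switches : Int) : Decidable (Pre_alternating_blocks a b length n_switches) := by unfold Pre_alternating_blocks; infer_instance
def pvWitness_alternating_blocks : Int × Int × Int × Int := (3, 9, 7, 2)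

def Spec_alternating_blocks (a : Int) (b : Int) (length : Int) (n_switches : Int) (out : List Int) : Prop := out = alternating_blocks_alt a b length n_switches
instance (a : Int) (b : Int) (length : Int) (n_switches : Int) (out : List Int) : Decidable (Spec_alternating_blocks a b length n_switches out) := by unfold Spec_alternating_blocks; infer_instance

-- ===== CLAIM (what is proved, stated in full; the proofs are below) =====
def Claim_equal_alternating_blocks : Prop := ∀ (a : Int) (b : Int) (length : Int) (n_switches : Int), Dom_alternating_blocks a b length n_switches → Pre_alternating_blocks a b length n_switches → Spec_alternating_blocks a b length n_switches (alternating_blocks a b length n_switches)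

-- ===== LEMMAS AND PROOFS =====

theorem pvDivShift (n bs k : Nat) (hbs : 0 < bs) : (n * bs + k) / bs = n + k / bs := by
  rw [Nat.add_comm, Nat.add_mul_div_right k n hbs]; omega

def pvF (a b : Int) (j : Nat) : Int := if j % 2 = 0 then a else b

theorem pvAltFlatten (a b : Int) (m : Nat) :
    (List.replicate m [a,b]).flatten = (List.range (2*m)).map (fun j => if j % 2 = 0 then a else b) := by
  induction m with
  | zero => simp
  | succ m ih =>
    rw [List.replicate_succ', List.flatten_append, ih]
    have h2 : 2 * (m + 1) = 2 * m + 1 + 1 := by ring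
    rw [h2, List.range_succ, List.range_succ, List.map_append, List.map_append]
    have e1 : (2 * m) % 2 = 0 := by omega
    have e2 : (2 * m + 1) % 2 = 1 := by omega
    simp [e1, e2]

theorem pvBlocksRange (g : Nat → Int) (bs : Nat) (n : Nat) :
    ((List.range n).map g).flatMap (List.replicate bs) = (List.range (n*bs)).map (fun i => g (i/bs)) := by
  induction n with
  | zero => simp
  | succ n ih =>
    rw [List.range_succ, List.map_append, List.flatMap_append, ih]
    have h2 : (n+1)*bs = n*bs + bs := by ring
    rw [h2, List.range_add, List.map_append, List.map_map]
    congr 1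
    rcases Nat.eq_zero_or_pos bs with hbs | hbs
    · simp [hbs]
    · have h : ∀ k ∈ List.range bs, ((fun i => g (i / bs)) ∘ (fun x => n * bs + x)) k = g n := by
        intro k hk
        rw [List.mem_range] at hk
        simp only [Function.comp]
        rw [pvDivShift n bs k hbs, Nat.div_eq_of_lt hk]; rfl
      rw [List.map_congr_left h]
      simp [List.map_const']

theorem pvPadRange (g : Nat → Int) (n bs r : Nat) (hn : 0 < n) (hbs : 0 < bs) :
    (List.range (n*bs)).map (fun i => g (i/bs)) ++ List.replicate r (g (n-1))
      = (List.range (n*bs + r)).map (fun i => g (min (i/bs) (n-1))) := by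
  rw [List.range_add, List.map_append]
  congr 1
  · apply List.map_congr_left
    intro i hi
    rw [List.mem_range] at hi
    have : i / bs < n := (Nat.div_lt_iff_lt_mul hbs).2 hi
    congr 1
    omega
  · rw [List.map_map]
    have h : ∀ k ∈ List.range r, ((fun i => g (min (i / bs) (n-1))) ∘ (fun x => n * bs + x)) k = g (n-1) := by
      intro k hk
      simp only [Function.comp]
      rw [pvDivShift n bs k hbs]
      rw [Nat.min_eq_right (le_trans (Nat.sub_le n 1) (Nat.le_add_right n _))]
    rw [List.map_congr_left h]
    simp [List.map_const']

-- values characterization in the 0 ≤ n_switches case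
theorem pvValues (a b : Int) (s : Nat) :
    PySem.List.slice ((List.replicate (PySem.Int.floordiv ((s:Int) + 1 + 1) 2).toNat [a, b]).flatten)
        none (some ((s:Int) + 1))
      = (List.range (s+1)).map (pvF a b) := by
  have hm : (PySem.Int.floordiv ((s:Int) + 1 + 1) 2).toNat = (s+2)/2 := by
    rw [PySem.Int.floordiv_eq_ediv_of_pos (by norm_num)]
    omega
  rw [hm, pvAltFlatten]
  have hc : ((s:Int) + 1) = ((s+1 : Nat) : Int) := by push_cast; ring
  rw [hc, PySem.List.slice_to_natCast, List.map_take.symm, List.take_range]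
  have : min (s+1) (2*((s+2)/2)) = s + 1 := by omega
  rw [this]
  rfl

theorem pvValuesLast (a b : Int) (s : Nat) :
    PySem.List.pyGet? ((List.range (s+1)).map (pvF a b)) (-1)
      = some (pvF a b s) := by
  rw [PySem.List.pyGet?_neg_one, List.getLast?_eq_getElem?]
  simp

theorem pvMain (a b length n_switches : Int)
    (hpre : 0 ≤ n_switches ∨ (n_switches ≤ -2 ∧ length ≤ 0)) :
    alternating_blocks a b length n_switches = alternating_blocks_alt a b length n_switches := by
  rcases hpre with hns | ⟨hns, hlen⟩
  · -- 0 ≤ n_switches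
    obtain ⟨s, rfl⟩ : ∃ s : Nat, n_switches = (s:Int) := ⟨n_switches.toNat, (Int.toNat_of_nonneg hns).symm⟩
    simp only [alternating_blocks, alternating_blocks_alt]
    rw [pvValues a b s]
    rcases (em (length ≤ 0)).imp id (fun h => by omega : ¬length ≤ 0 → 0 < length) with hlen0 | hlenpos
    · -- length ≤ 0 : both sides []
      have hb : (PySem.Int.floordiv length ((s:Int) + 1)).toNat = 0 := by
        rw [PySem.Int.floordiv_eq_ediv_of_pos (by positivity)]
        have := Int.ediv_le_ediv (c := (s:Int)+1) (by positivity) hlen0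
        simp at this
        omega
      rw [hb, PySem.List.pyRange_one_eq_nil hlen0]
      simp
      omega
    · -- 0 < length
      obtain ⟨L, rfl⟩ : ∃ L : Nat, length = (L:Int) := ⟨length.toNat, (Int.toNat_of_nonneg (le_of_lt hlenpos)).symm⟩
      have hLpos : 0 < L := by exact_mod_cast hlenpos
      have hbsc : PySem.Int.floordiv (L:Int) ((s:Int) + 1) = ((L/(s+1) : Nat) : Int) := by
        rw [PySem.Int.floordiv_eq_ediv_of_pos (by positivity), Int.natCast_div]
        push_cast; ring_nf
      set bs : Nat := L/(s+1) with hbs_def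
      have hble : (s+1)*bs ≤ L := by
        rw [hbs_def, Nat.mul_comm]
        exact Nat.div_mul_le_self L (s+1)
      rw [hbsc]
      simp only [Int.toNat_natCast]
      have hlst : List.foldl (fun lst v => lst ++ List.replicate bs v) []
            (List.map (pvF a b) (List.range (s + 1)))
          = (List.range ((s+1)*bs)).map (fun i => pvF a b (i/bs)) := by
        rw [PySem.List.foldl_append_eq_flatMap, List.nil_append,
            pvBlocksRange (pvF a b) bs (s+1)]
      rw [hlst, pvValuesLast a b s]
      clear_value bs
      have hB : ∀ body : Int → Int,
          List.foldl (fun out i => out ++ [body i]) [] (PySem.List.pyRange 0 (L:Int))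
            = List.map (fun k : Nat => body ((0:Int) + (k:Int))) (List.range L) := by
        intro body
        rw [PySem.List.foldl_append_singleton_eq_map, List.nil_append, PySem.List.pyRange_one,
            List.map_map]
        have : ((L:Int) - 0).toNat = L := by omega
        rw [this]
        rfl
      rw [hB]
      simp only [List.length_map, List.length_range]
      rcases Nat.eq_zero_or_pos bs with hbs0 | hbspos
      · -- block_size = 0 : A pads everything, B takes the else branch everywhere
        have hcond : ¬ ((bs:Int) > 0) := by omega
        have helse : (if PySem.Int.mod ((s:Int) + 1) 2 = 1 then a else b)
            = pvF a b s := by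
          unfold pvF
          have hm : PySem.Int.mod ((s:Int) + 1) 2 = (((s+1) % 2 : Nat) : Int) := by
            rw [PySem.Int.mod_eq_emod_of_pos (by norm_num)]
            push_cast
            omega
          rw [hm]
          rcases Nat.even_or_odd s with hs | hs
          · have h0 : s % 2 = 0 := Nat.even_iff.mp hs
            have h1 : (s+1) % 2 = 1 := by omega
            simp [h0, h1]
          · have h0 : s % 2 = 1 := Nat.odd_iff.mp hs
            have h1 : (s+1) % 2 = 0 := by omega
            simp [h0, h1]
        subst hbs0
        simp only [Nat.mul_zero, List.range_zero, List.map_nil]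
        rw [if_pos (by omega : (L:Int) - (0:Nat) > 0)]
        simp only [if_neg hcond, helse, List.map_const', List.length_range, List.nil_append]
        congr 1
        try omega
      · -- block_size ≥ 1
        set r : Nat := L - (s+1)*bs with hr
        have hrle : (s+1)*bs + r = L := by omega
        have hkey : (List.range ((s+1)*bs)).map (fun i => pvF a b (i/bs)) ++ List.replicate r (pvF a b s)
            = (List.range L).map (fun k => pvF a b (min (k/bs) s)) := by
          have h := pvPadRange (pvF a b) (s+1) bs r (Nat.succ_pos s) hbspos
          simp only [Nat.add_sub_cancel] at h
          rw [h, hrle]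
        have hBelem : ∀ k ∈ List.range L,
            (if (bs:Int) > 0 then
              (if PySem.Int.mod (min (PySem.Int.floordiv ((0:Int) + (k:Int)) (bs:Int)) ((s:Int) + 1 - 1)) 2 = 0 then a else b)
             else (if PySem.Int.mod ((s:Int) + 1) 2 = 1 then a else b))
            = pvF a b (min (k/bs) s) := by
          intro k hk
          rw [if_pos (by exact_mod_cast hbspos : (bs:Int) > 0)]
          have hfd : PySem.Int.floordiv ((0:Int) + (k:Int)) (bs:Int) = ((k/bs : Nat) : Int) := by
            rw [PySem.Int.floordiv_eq_ediv_of_pos (by exact_mod_cast hbspos), Int.natCast_div]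
            ring_nf
          rw [hfd]
          have hmin : min (((k/bs : Nat)) : Int) ((s:Int) + 1 - 1) = ((min (k/bs) s : Nat) : Int) := by
            rw [Nat.cast_min]
            congr 1
            omega
          rw [hmin]
          have hmod : PySem.Int.mod ((min (k/bs) s : Nat) : Int) 2 = ((min (k/bs) s % 2 : Nat) : Int) := by
            rw [PySem.Int.mod_eq_emod_of_pos (by norm_num)]
            omega
          rw [hmod]
          unfold pvF
          by_cases hp : min (k/bs) s % 2 = 0
          · rw [if_pos (by exact_mod_cast hp), if_pos hp]
          · rw [if_neg (by exact_mod_cast hp), if_neg hp]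
        rw [List.map_congr_left hBelem, ← hkey]
        have hpad : (((L:Int)) - (((s+1)*bs : Nat) : Int)).toNat = r := by omega
        split_ifs with hrem
        · rw [hpad]
        · have hr0 : r = 0 := by omega
          rw [hr0]
          simp
  · -- n_switches ≤ -2, length ≤ 0
    simp only [alternating_blocks, alternating_blocks_alt]
    have hval : (PySem.Int.floordiv (n_switches + 1 + 1) 2).toNat = 0 := by
      rw [PySem.Int.floordiv_eq_ediv_of_pos (by norm_num)]
      omega
    rw [hval]
    have hsl : PySem.List.slice (List.flatten (List.replicate 0 [a,b])) none (some (n_switches+1)) = ([]:List Int) := by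
      simp [PySem.List.slice]
    rw [hsl]
    rw [PySem.List.pyRange_one_eq_nil hlen]
    simp
    omega


-- ===== VERDICT (by name: the statement is the Claim_ definition above) =====
theorem alternating_blocks_spec : Claim_equal_alternating_blocks := by
  intro a b length n_switches _ hpre
  unfold Pre_alternating_blocks at hpre
  unfold Spec_alternating_blocks
  exact pvMain a b length n_switches hpre
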